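-- pv_equiv track=rewrite | github.com/pavlik-y/Scratch | PythonText/slon.py | cropToWindow
-- ===== SOURCE A (Python) =====
-- def cropToWindow(tokens, offset_y, offset_x, height, width):
--   y = 0
--   x = 0
--   for (v, t) in tokens:
--     if v == "\n":
--       if offset_y <= y < offset_y + height:
--         yield (v, t)
--       y+= 1
--       x = 0
--       continue
--     if y < offset_y:
--       continue
--     if offset_y + height <= y:
--       break
--     # y within bounds
--     if x + len(v) <= offset_x or x >= offset_x + width:
--       x += len(v)
--       continue
--     # at least part of the token is visible
--     if x < offset_x:
--       v = v[offset_x - x:]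
--       x = offset_x
--     if x + len(v) > offset_x + width:
--       yield (v[:offset_x + width - x], t)
--     else:
--       yield (v, t)
--     x += len(v)
-- ===== SOURCE B (Python) =====
-- def cropToWindow(tokens, offset_y, offset_x, height, width):
--     # Phase 1: group the flat token stream into lines (tokens, newline-token-or-None).
--     lines = []
--     cur = []
--     for tok in tokens:
--         if tok[0] == "\n":
--             lines.append((cur, tok))
--             cur = []
--         else:
--             cur.append(tok)
--     if cur:
--         lines.append((cur, None))
--     # Phase 2: emit only the lines inside the vertical window, cropping horizontally.
--     for y, (line, nl) in enumerate(lines):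
--         if y < offset_y:
--             continue
--         if offset_y + height <= y:
--             break
--         x = 0
--         for (v, t) in line:
--             L = len(v)
--             if not (x + L <= offset_x or offset_x + width <= x):
--                 if x < offset_x:
--                     v2, start = v[offset_x - x:], offset_x
--                 else:
--                     v2, start = v, x
--                 if start + len(v2) > offset_x + width:
--                     yield (v2[:offset_x + width - start], t)
--                 else:
--                     yield (v2, t)
--             x += L
--         if nl is not None:
--             yield nl
-- ===== Notes on version B (the rewrite author's own statement) =====
-- stated objective: alternative
-- what changed: Replaces A's flat single-pass state machine over the token stream by a two-phase decomposition: first group tokens into lines (with their newline token), then iterate line indices skipping/breaking by the vertical window and crop each visible line horizontally.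
import Mathlib
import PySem

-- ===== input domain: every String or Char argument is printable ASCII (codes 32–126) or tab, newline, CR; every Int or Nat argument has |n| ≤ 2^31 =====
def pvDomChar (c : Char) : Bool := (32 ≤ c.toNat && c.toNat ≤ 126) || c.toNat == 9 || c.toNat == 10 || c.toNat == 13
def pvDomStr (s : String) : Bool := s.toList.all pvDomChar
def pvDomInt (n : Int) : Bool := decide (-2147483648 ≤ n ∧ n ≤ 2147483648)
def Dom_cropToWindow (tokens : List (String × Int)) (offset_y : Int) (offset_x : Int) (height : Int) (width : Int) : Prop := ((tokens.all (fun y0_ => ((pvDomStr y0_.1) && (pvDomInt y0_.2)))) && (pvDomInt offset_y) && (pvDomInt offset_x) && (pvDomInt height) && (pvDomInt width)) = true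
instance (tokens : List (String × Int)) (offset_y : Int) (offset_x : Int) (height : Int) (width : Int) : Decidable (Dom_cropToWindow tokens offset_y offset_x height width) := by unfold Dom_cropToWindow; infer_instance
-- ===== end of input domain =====

-- B replaces A's flat single-pass state machine by a two-phase decomposition (group tokens
-- into lines, then window the lines), same yielded tokens; objective: alternative.

-- ===== PORT A =====
-- the generator's flat loop: state (y, x), yields collected in order
def cropA (offset_y offset_x height width : Int) :
    List (String × Int) → Int → Int → List (String × Int)
  | [], _, _ => []
  | (v, t) :: rest, y, x =>
    if v = "\n" then
      (if offset_y ≤ y ∧ y < offset_y + height then [(v, t)] else []) ++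
        cropA offset_y offset_x height width rest (y + 1) 0
    else if y < offset_y then
      cropA offset_y offset_x height width rest y x
    else if offset_y + height ≤ y then
      []
    else if x + PySem.Str.len v ≤ offset_x ∨ offset_x + width ≤ x then
      cropA offset_y offset_x height width rest y (x + PySem.Str.len v)
    else
      let (v', x') :=
        if x < offset_x then (PySem.Str.slice v (some (offset_x - x)) none, offset_x)
        else (v, x)
      (if x' + PySem.Str.len v' > offset_x + width then
          (PySem.Str.slice v' none (some (offset_x + width - x')), t)
        else (v', t)) :: cropA offset_y offset_x height width rest y (x' + PySem.Str.len v')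

def cropToWindow (tokens : List (String × Int)) (offset_y : Int) (offset_x : Int) (height : Int) (width : Int) : List (String × Int) :=
  cropA offset_y offset_x height width tokens 0 0

-- ===== PORT B =====
-- phase 1: group the flat token stream into lines (tokens, newline-token-or-none)
def glAux : List (String × Int) → List (String × Int) →
    List (List (String × Int) × Option (String × Int))
  | cur, [] => if cur = [] then [] else [(cur, none)]
  | cur, (v, t) :: rest =>
    if v = "\n" then (cur, some (v, t)) :: glAux [] rest
    else glAux (cur ++ [(v, t)]) rest

-- phase 2 inner loop: crop one line horizontally, x the running offset
def procLine (offset_x width : Int) : List (String × Int) → Int → List (String × Int)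
  | [], _ => []
  | (v, t) :: rest, x =>
    (if ¬ (x + PySem.Str.len v ≤ offset_x ∨ offset_x + width ≤ x) then
      let (v2, start) :=
        if x < offset_x then (PySem.Str.slice v (some (offset_x - x)) none, offset_x)
        else (v, x)
      [(if start + PySem.Str.len v2 > offset_x + width then
          (PySem.Str.slice v2 none (some (offset_x + width - start)), t)
        else (v2, t))]
    else []) ++ procLine offset_x width rest (x + PySem.Str.len v)

-- phase 2 outer loop over line indices: skip before offset_y, break at offset_y+height
def render (offset_y offset_x height width : Int) :
    List (List (String × Int) × Option (String × Int)) → Int → List (String × Int)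
  | [], _ => []
  | (line, nl) :: rest, y =>
    if y < offset_y then render offset_y offset_x height width rest (y + 1)
    else if offset_y + height ≤ y then []
    else procLine offset_x width line 0 ++ nl.toList ++
      render offset_y offset_x height width rest (y + 1)

def cropToWindow_alt (tokens : List (String × Int)) (offset_y : Int) (offset_x : Int) (height : Int) (width : Int) : List (String × Int) :=
  render offset_y offset_x height width (glAux [] tokens) 0

-- ===== PRECONDITION & SPEC =====
def Spec_cropToWindow (tokens : List (String × Int)) (offset_y : Int) (offset_x : Int) (height : Int) (width : Int) (out : List (String × Int)) : Prop := out = cropToWindow_alt tokens offset_y offset_x height width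
instance (tokens : List (String × Int)) (offset_y : Int) (offset_x : Int) (height : Int) (width : Int) (out : List (String × Int)) : Decidable (Spec_cropToWindow tokens offset_y offset_x height width out) := by unfold Spec_cropToWindow; infer_instance

-- ===== CLAIM (what is proved, stated in full; the proofs are below) =====
def Claim_equal_cropToWindow : Prop := ∀ (tokens : List (String × Int)) (offset_y : Int) (offset_x : Int) (height : Int) (width : Int), Dom_cropToWindow tokens offset_y offset_x height width → Spec_cropToWindow tokens offset_y offset_x height width (cropToWindow tokens offset_y offset_x height width)

-- ===== LEMMAS AND PROOFS =====

-- cons-style (accumulator-free) grouping, for induction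
def consHead (tok : String × Int) :
    List (List (String × Int) × Option (String × Int)) →
    List (List (String × Int) × Option (String × Int))
  | [] => [([tok], none)]
  | (l, nl) :: ls => ((tok :: l, nl)) :: ls

def glCons : List (String × Int) → List (List (String × Int) × Option (String × Int))
  | [] => []
  | (v, t) :: rest =>
    if v = "\n" then ([], some (v, t)) :: glCons rest
    else consHead (v, t) (glCons rest)

def consAll (cur : List (String × Int)) :
    List (List (String × Int) × Option (String × Int)) →
    List (List (String × Int) × Option (String × Int))
  | [] => if cur = [] then [] else [(cur, none)]
  | (l, nl) :: ls => (cur ++ l, nl) :: ls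

theorem consAll_nil (ls : List (List (String × Int) × Option (String × Int))) :
    consAll [] ls = ls := by
  cases ls with
  | nil => rfl
  | cons p ls => cases p; simp [consAll]

theorem consAll_consHead (cur : List (String × Int)) (tok : String × Int)
    (ls : List (List (String × Int) × Option (String × Int))) :
    consAll cur (consHead tok ls) = consAll (cur ++ [tok]) ls := by
  cases ls with
  | nil => simp [consHead, consAll]
  | cons p ls => cases p; simp [consHead, consAll]

theorem glAux_eq_consAll (ts cur : List (String × Int)) :
    glAux cur ts = consAll cur (glCons ts) := by
  induction ts generalizing cur with
  | nil => rfl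
  | cons p rest ih =>
    obtain ⟨v, t⟩ := p
    by_cases hv : v = "\n"
    · subst hv
      simp only [glAux, glCons, reduceIte, ih [], consAll]
      cases hgl : glCons rest with
      | nil => simp
      | cons p ls => cases p; simp
    · simp [glAux, glCons, hv, ih (cur ++ [(v, t)]), consAll_consHead]

-- renderX: render, but the head line starts at offset x (A's mid-line state)
def renderX (offset_y offset_x height width : Int) :
    List (List (String × Int) × Option (String × Int)) → Int → Int → List (String × Int)
  | [], _, _ => []
  | (line, nl) :: rest, y, x =>
    if y < offset_y then render offset_y offset_x height width rest (y + 1)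
    else if offset_y + height ≤ y then []
    else procLine offset_x width line x ++ nl.toList ++
      render offset_y offset_x height width rest (y + 1)

theorem render_eq_renderX (oy ox h w : Int)
    (ls : List (List (String × Int) × Option (String × Int))) (y : Int) :
    render oy ox h w ls y = renderX oy ox h w ls y 0 := by
  cases ls with
  | nil => rfl
  | cons p ls => cases p; rfl

-- past (or below) the window nothing more is ever yielded
theorem cropA_empty (oy ox h w : Int) (ts : List (String × Int)) (y x : Int)
    (hy : oy + h ≤ y ∨ h ≤ 0) : cropA oy ox h w ts y x = [] := by
  induction ts generalizing y x with
  | nil => rfl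
  | cons p rest ih =>
    obtain ⟨v, t⟩ := p
    by_cases hv : v = "\n"
    · have hnot : ¬ (oy ≤ y ∧ y < oy + h) := by omega
      simp only [cropA, hv, if_pos rfl, hnot, if_neg hnot, if_false]
      simpa using ih (y + 1) 0 (by omega)
    · by_cases hlt : y < oy
      · simp only [cropA, hv, if_neg hv, if_pos hlt]
        exact ih y x hy
      · have hbr : oy + h ≤ y := by omega
        simp [cropA, hv, hlt, hbr]

-- the x-advance of A's emit branch equals x + len v
theorem emit_advance (ox w x : Int) (v : String)
    (h1 : ¬ (x + PySem.Str.len v ≤ ox ∨ ox + w ≤ x)) :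
    (if x < ox then (PySem.Str.slice v (some (ox - x)) none, ox) else (v, x)).2 +
      PySem.Str.len (if x < ox then (PySem.Str.slice v (some (ox - x)) none, ox) else (v, x)).1
      = x + PySem.Str.len v := by
  by_cases hx : x < ox
  · simp only [if_pos hx]
    have h0 : (0:Int) ≤ ox - x := by omega
    have hlen := PySem.Str.len_eq v
    have : (PySem.Str.slice v (some (ox - x)) none).toList =
        v.toList.drop (ox - x).toNat := by
      simp [PySem.Str.toList_slice, PySem.Chars.slice_eq_listSlice,
        PySem.List.slice_from _ h0]
    rw [PySem.Str.len_eq, this, List.length_drop]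
    have hsub : (ox - x).toNat ≤ v.toList.length := by
      rw [PySem.Str.len_eq] at h1; omega
    rw [PySem.Str.len_eq] at h1 ⊢
    omega
  · simp [if_neg hx]

theorem consHead_skip (oy ox h w : Int) (tok : String × Int)
    (ls : List (List (String × Int) × Option (String × Int))) (y x : Int)
    (hy : y < oy) :
    renderX oy ox h w (consHead tok ls) y x = renderX oy ox h w ls y x := by
  cases ls with
  | nil => simp [consHead, renderX, render, hy]
  | cons p ls => cases p; simp [consHead, renderX, render, hy]

theorem consHead_break (oy ox h w : Int) (tok : String × Int)
    (ls : List (List (String × Int) × Option (String × Int))) (y x : Int)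
    (hy1 : ¬ y < oy) (hy2 : oy + h ≤ y) :
    renderX oy ox h w (consHead tok ls) y x = [] := by
  cases ls with
  | nil => simp [consHead, renderX, hy1, hy2]
  | cons p ls => cases p; simp [consHead, renderX, hy1, hy2]

theorem consHead_inrange (oy ox h w : Int) (v : String) (t : Int)
    (ls : List (List (String × Int) × Option (String × Int))) (y x : Int)
    (hy1 : ¬ y < oy) (hy2 : ¬ oy + h ≤ y) :
    renderX oy ox h w (consHead (v, t) ls) y x =
      (if ¬ (x + PySem.Str.len v ≤ ox ∨ ox + w ≤ x) then
        let (v2, start) :=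
          if x < ox then (PySem.Str.slice v (some (ox - x)) none, ox) else (v, x)
        [(if start + PySem.Str.len v2 > ox + w then
            (PySem.Str.slice v2 none (some (ox + w - start)), t)
          else (v2, t))]
      else []) ++ renderX oy ox h w ls y (x + PySem.Str.len v) := by
  cases ls with
  | nil => simp [consHead, renderX, render, procLine, hy1, hy2]
  | cons p ls => cases p; simp [consHead, renderX, procLine, hy1, hy2, List.append_assoc]

theorem cropA_eq_renderX (oy ox h w : Int) (ts : List (String × Int)) (y x : Int) :
    cropA oy ox h w ts y x = renderX oy ox h w (glCons ts) y x := by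
  induction ts generalizing y x with
  | nil => rfl
  | cons p rest ih =>
    obtain ⟨v, t⟩ := p
    by_cases hv : v = "\n"
    · subst hv
      by_cases hlt : y < oy
      · have hnot : ¬ (oy ≤ y ∧ y < oy + h) := by omega
        simp only [cropA, glCons, renderX, reduceIte, hnot, if_false, if_pos hlt,
          List.nil_append]
        rw [ih (y + 1) 0, render_eq_renderX]
      · by_cases hbr : oy + h ≤ y
        · have hnot : ¬ (oy ≤ y ∧ y < oy + h) := by omega
          simp only [cropA, glCons, renderX, reduceIte, hnot, if_false, if_neg hlt,
            if_pos hbr, List.nil_append]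
          exact cropA_empty oy ox h w rest (y + 1) 0 (by omega)
        · have hin : oy ≤ y ∧ y < oy + h := by omega
          simp only [cropA, glCons, renderX, reduceIte, if_pos hin, if_neg hlt,
            if_neg hbr, procLine, Option.toList_some, List.nil_append]
          rw [ih (y + 1) 0, render_eq_renderX]
    · simp only [cropA, if_neg hv, glCons, if_neg hv]
      by_cases hlt : y < oy
      · simp only [if_pos hlt]
        rw [ih y x, consHead_skip oy ox h w (v, t) (glCons rest) y x hlt]
      · by_cases hbr : oy + h ≤ y
        · simp only [if_neg hlt, if_pos hbr]
          rw [consHead_break oy ox h w (v, t) (glCons rest) y x hlt hbr]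
        · rw [consHead_inrange oy ox h w v t (glCons rest) y x hlt hbr]
          by_cases hskip : x + PySem.Str.len v ≤ ox ∨ ox + w ≤ x
          · simp only [if_neg hlt, if_neg hbr, if_pos hskip, if_neg (not_not_intro hskip),
              List.nil_append]
            exact ih y (x + PySem.Str.len v)
          · simp only [if_neg hlt, if_neg hbr, if_neg hskip, if_pos hskip]
            rw [emit_advance ox w x v hskip, ih y (x + PySem.Str.len v)]
            rfl

-- ===== VERDICT (by name: the statement is the Claim_ definition above) =====
theorem cropToWindow_spec : Claim_equal_cropToWindow := by
  intro tokens oy ox h w _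
  show cropToWindow tokens oy ox h w = cropToWindow_alt tokens oy ox h w
  rw [cropToWindow, cropToWindow_alt, glAux_eq_consAll, consAll_nil,
    render_eq_renderX, cropA_eq_renderX]
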